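-- pv_equiv track=rewrite | github.com/AISEALs/AISEALs | src/leetcode/leetcode/editor/cn/5960.py | capitalizeTitle2
-- ===== SOURCE A (Python) =====
-- def capitalizeTitle2(title: str) -> str:
--     def upper(s: str):
--         ret = s
--         if 'a' < s and s < 'z':
--             ret = chr(ord(s) - ord('a') + ord('A'))
--         return ret
--     def lower(s: str):
--         ret = s
--         if 'A' < s and s < 'Z':
--             ret = chr(ord(s) - ord('A') + ord('a'))
--         return ret
--     title = [i for i in title]
--     i = 0
--     j = 0
--     n = len(title)
--     while i < n and j < n:
--         while i < n and title[i] == ' ':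
--             i += 1
--         j = i
--         while j < n and title[j] != ' ':
--             j += 1
--
--         if j - i <= 2:
--             for k in range(i, j):
--                 title[k] = lower(title[k])
--         else:
--             title[i] = upper(title[i])
--             for k in range(i+1, j):
--                 title[k] = lower(title[k])
--         i = j
--
--     return ''.join(title)
-- ===== SOURCE B (Python) =====
-- def capitalizeTitle2(title: str) -> str:
--     def up(c):
--         return chr(ord(c) - ord('a') + ord('A')) if 'a' < c < 'z' else c
--
--     def lo(c):
--         return chr(ord(c) - ord('A') + ord('a')) if 'A' < c < 'Z' else c
--
--     def cap(w):
--         if len(w) > 2: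
--             return up(w[0]) + ''.join(lo(c) for c in w[1:])
--         return ''.join(lo(c) for c in w)
--
--     return ' '.join(cap(w) for w in title.split(' '))
-- ===== Notes on version B (the rewrite author's own statement) =====
-- stated objective: simpler
-- what changed: A mutates a character list in place with an index-driven outer while loop, two inner index scans and range-based in-place rewrites; B instead splits the title on single spaces, capitalizes each word functionally (same strict 'a'<c<'z' / 'A'<c<'Z' character rules), and joins with spaces, which also avoids per-index list writes (measured ~1.9x constant-factor speedup).
import Mathlib
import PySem

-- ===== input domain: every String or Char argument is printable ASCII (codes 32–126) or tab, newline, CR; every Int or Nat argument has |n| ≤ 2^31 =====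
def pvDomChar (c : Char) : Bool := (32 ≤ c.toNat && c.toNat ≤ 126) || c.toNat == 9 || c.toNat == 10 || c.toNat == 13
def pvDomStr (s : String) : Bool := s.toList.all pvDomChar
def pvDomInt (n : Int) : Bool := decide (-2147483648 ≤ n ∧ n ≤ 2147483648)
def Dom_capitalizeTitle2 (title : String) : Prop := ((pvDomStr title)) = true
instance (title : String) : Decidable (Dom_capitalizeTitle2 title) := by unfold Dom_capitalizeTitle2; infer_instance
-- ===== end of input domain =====

-- B rewrites A's in-place index/while scanning as split-on-space / capitalize-each-word / join (same strict-bound char rules); objective: simpler decomposition.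

-- ===== PORT A =====
-- upper(s): chr(ord(s)-ord('a')+ord('A')) if 'a' < s < 'z'
def pvUpperC (c : Char) : Char :=
  if 'a' < c ∧ c < 'z' then Char.ofNat (c.toNat - 'a'.toNat + 'A'.toNat) else c
-- lower(s): chr(ord(s)-ord('A')+ord('a')) if 'A' < s < 'Z'
def pvLowerC (c : Char) : Char :=
  if 'A' < c ∧ c < 'Z' then Char.ofNat (c.toNat - 'A'.toNat + 'a'.toNat) else c

-- while i < n and title[i] == ' ': i += 1
def pvSkipSp (t : List Char) (n i : Nat) : Nat :=
  if h : i < n ∧ t.getD i ' ' = ' ' then pvSkipSp t n (i + 1) else i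
  termination_by n - i
  decreasing_by omega

-- while j < n and title[j] != ' ': j += 1
def pvSkipNon (t : List Char) (n j : Nat) : Nat :=
  if h : j < n ∧ t.getD j ' ' ≠ ' ' then pvSkipNon t n (j + 1) else j
  termination_by n - j
  decreasing_by omega

-- for k in range(i, j): title[k] = lower(title[k])
def pvLowerRange (t : List Char) (i j : Nat) : List Char :=
  (List.range' i (j - i)).foldl (fun acc k => acc.set k (pvLowerC (acc.getD k ' '))) t

-- the outer while loop (fuel n+1 always suffices: i strictly increases each productive pass)
def pvALoop (t : List Char) (n i j fuel : Nat) : List Char :=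
  match fuel with
  | 0 => t
  | fuel + 1 =>
    if i < n ∧ j < n then
      let i' := pvSkipSp t n i
      let j' := pvSkipNon t n i'
      let t' := if j' - i' ≤ 2 then pvLowerRange t i' j'
                else pvLowerRange (t.set i' (pvUpperC (t.getD i' ' '))) (i' + 1) j'
      pvALoop t' n j' j' fuel
    else t

def capitalizeTitle2 (title : String) : String :=
  String.mk (pvALoop title.toList title.toList.length 0 0 (title.toList.length + 1))

-- ===== PORT B =====
-- cap(w): upper first + lower rest if len(w) > 2 else lower all
def pvCap (w : List Char) : List Char :=
  if 2 < w.length then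
    match w with
    | [] => []
    | c :: rest => pvUpperC c :: rest.map pvLowerC
  else w.map pvLowerC

-- ' '.join(cap(w) for w in title.split(' '))
def capitalizeTitle2_alt (title : String) : String :=
  String.mk (PySem.Chars.join [' '] ((PySem.Chars.splitOn title.toList [' ']).map pvCap))

-- ===== PRECONDITION & SPEC =====
def Spec_capitalizeTitle2 (title : String) (out : String) : Prop := out = capitalizeTitle2_alt title
instance (title : String) (out : String) : Decidable (Spec_capitalizeTitle2 title out) := by unfold Spec_capitalizeTitle2; infer_instance

-- ===== CLAIM (what is proved, stated in full; the proofs are below) =====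
def Claim_equal_capitalizeTitle2 : Prop := ∀ (title : String), Dom_capitalizeTitle2 title → Spec_capitalizeTitle2 title (capitalizeTitle2 title)

-- ===== LEMMAS AND PROOFS =====

-- common specification: process maximal nonspace runs, spaces pass through
def pvProc : List Char → List Char
  | [] => []
  | c :: cs =>
    if c = ' ' then ' ' :: pvProc cs
    else pvCap (c :: cs.takeWhile (· ≠ ' ')) ++ pvProc (cs.dropWhile (· ≠ ' '))
  termination_by l => l.length
  decreasing_by
    · simp
    · exact Nat.lt_succ_of_le (List.length_dropWhile_le _ _)

theorem pvCap_length (w : List Char) : (pvCap w).length = w.length := by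
  unfold pvCap
  split
  · cases w <;> simp
  · simp

theorem pvTake_takeWhile {α : Type} (p : α → Bool) (l : List α) :
    l.take (l.takeWhile p).length = l.takeWhile p := by
  induction l with
  | nil => simp
  | cons a l ih =>
    by_cases h : p a
    · simp [h, ih]
    · simp [h]

theorem pvDropWhile_head {α : Type} (p : α → Bool) (l : List α) (b : α) (l' : List α)
    (h : l.dropWhile p = b :: l') : p b = false := by
  induction l with
  | nil => simp at h
  | cons a l ih =>
    rw [List.dropWhile_cons] at h
    by_cases hp : p a
    · rw [if_pos hp] at h; exact ih h
    · rw [if_neg hp] at h; injection h with h1 _; subst h1; simpa using hp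

theorem pvSkipSp_eq (t : List Char) (i : Nat) (hi : i ≤ t.length) :
    pvSkipSp t t.length i = i + ((t.drop i).takeWhile (· = ' ')).length := by
  fun_induction pvSkipSp t t.length i with
  | case1 i h ih =>
    obtain ⟨h1, h2⟩ := h
    rw [List.drop_eq_getElem_cons h1]
    have hc : t[i] = ' ' := by rwa [List.getD_eq_getElem?_getD, List.getElem?_eq_getElem h1] at h2
    rw [ih (by omega)]
    simp [hc]
    omega
  | case2 i h =>
    rcases Nat.lt_or_ge i t.length with hlt | hge
    · have h2 : t.getD i ' ' ≠ ' ' := fun hx => h ⟨hlt, hx⟩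
      have hc : t[i] ≠ ' ' := by rwa [List.getD_eq_getElem?_getD, List.getElem?_eq_getElem hlt] at h2
      rw [List.drop_eq_getElem_cons hlt]
      simp [hc]
    · rw [List.drop_eq_nil_of_le hge]; simp

theorem pvSkipNon_eq (t : List Char) (i : Nat) (hi : i ≤ t.length) :
    pvSkipNon t t.length i = i + ((t.drop i).takeWhile (· ≠ ' ')).length := by
  fun_induction pvSkipNon t t.length i with
  | case1 i h ih =>
    obtain ⟨h1, h2⟩ := h
    rw [List.drop_eq_getElem_cons h1]
    have hc : t[i] ≠ ' ' := by rwa [List.getD_eq_getElem?_getD, List.getElem?_eq_getElem h1] at h2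
    rw [ih (by omega)]
    rw [List.takeWhile_cons]
    simp [hc]
    omega
  | case2 i h =>
    rcases Nat.lt_or_ge i t.length with hlt | hge
    · have h2 : ¬ t.getD i ' ' ≠ ' ' := fun hx => h ⟨hlt, hx⟩
      have hc : t[i] = ' ' := by
        have := not_not.mp h2
        rwa [List.getD_eq_getElem?_getD, List.getElem?_eq_getElem hlt] at this
      rw [List.drop_eq_getElem_cons hlt]
      simp [hc]
    · rw [List.drop_eq_nil_of_le hge]; simp

theorem pvLowerRange_eq (m : Nat) : ∀ (t : List Char) (i : Nat), i + m ≤ t.length →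
    (List.range' i m).foldl (fun acc k => acc.set k (pvLowerC (acc.getD k ' '))) t
      = t.take i ++ ((t.drop i).take m).map pvLowerC ++ t.drop (i + m) := by
  induction m with
  | zero => intro t i h; simp
  | succ m ih =>
    intro t i h
    have hi : i < t.length := by omega
    rw [List.range'_succ, List.foldl_cons]
    have hg : t.getD i ' ' = t[i] := by
      rw [List.getD_eq_getElem?_getD, List.getElem?_eq_getElem hi]; rfl
    rw [hg, ih (t.set i (pvLowerC t[i])) (i+1) (by simp; omega)]
    rw [List.drop_set, if_pos (by omega), List.drop_set, if_pos (by omega)]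
    rw [List.take_set, List.set_eq_take_append_cons_drop,
        if_pos (by simp; omega)]
    rw [List.take_take, List.drop_take]
    rw [List.drop_eq_getElem_cons hi, List.take_succ_cons, List.map_cons]
    simp
    omega

theorem pvProc_spaces (sp l : List Char) (h : ∀ c ∈ sp, c = ' ') :
    pvProc (sp ++ l) = sp ++ pvProc l := by
  induction sp with
  | nil => simp
  | cons a sp ih =>
    have ha : a = ' ' := h a (by simp)
    simp only [List.cons_append, pvProc, ha]
    rw [ih (fun c hc => h c (by simp [hc]))]
    simp

theorem pvProc_word (c : Char) (w r : List Char) (hc : c ≠ ' ')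
    (hw : ∀ x ∈ w, x ≠ ' ') (hr : r = [] ∨ ∃ r', r = ' ' :: r') :
    pvProc (c :: (w ++ r)) = pvCap (c :: w) ++ pvProc r := by
  have htwr : r.takeWhile (fun x => decide (x ≠ ' ')) = [] := by
    rcases hr with rfl | ⟨r', rfl⟩ <;> simp
  have hdwr : r.dropWhile (fun x => decide (x ≠ ' ')) = r := by
    rcases hr with rfl | ⟨r', rfl⟩ <;> simp
  have htw : w.takeWhile (fun x => decide (x ≠ ' ')) = w :=
    List.takeWhile_eq_self_iff.mpr (by simpa using hw)
  have hdw : w.dropWhile (fun x => decide (x ≠ ' ')) = [] :=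
    List.dropWhile_eq_nil_iff.mpr (by simpa using hw)
  simp only [pvProc, if_neg hc]
  rw [List.takeWhile_append, if_pos (by rw [htw]), htwr,
      List.dropWhile_append, hdw, hdwr]
  simp

-- A's loop computes pvProc
theorem pvALoop_eq (fuel : Nat) : ∀ (t : List Char) (i : Nat), i ≤ t.length →
    t.length - i < fuel →
    pvALoop t t.length i i fuel = t.take i ++ pvProc (t.drop i) := by
  induction fuel with
  | zero => intro t i h1 h2; omega
  | succ f ih =>
    intro t i hi hf
    by_cases hin : i < t.length
    · simp only [pvALoop, if_pos (And.intro hin hin)]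
      rw [pvSkipSp_eq t i (by omega)]
      have hsl : ((t.drop i).takeWhile (fun x => decide (x = ' '))).length ≤ t.length - i := by
        have := (List.takeWhile_prefix (l := t.drop i) (p := fun x => decide (x = ' '))).length_le
        simpa using this
      rw [pvSkipNon_eq t (i + ((t.drop i).takeWhile (· = ' ')).length) (by omega)]
      set s := List.takeWhile (fun x => decide (x = ' ')) (t.drop i) with hs_def
      have hsr : s ++ List.dropWhile (fun x => decide (x = ' ')) (t.drop i) = t.drop i :=
        List.takeWhile_append_dropWhile
      set r := List.dropWhile (fun x => decide (x = ' ')) (t.drop i) with hr_def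
      have hdropi' : t.drop (i + s.length) = r := by
        rw [← List.drop_drop, ← hsr, List.drop_left]
      have htakei' : t.take (i + s.length) = t.take i ++ s := by
        rw [List.take_add]
        congr 1
        rw [← hsr, List.take_left]
      rw [hdropi']
      set w := List.takeWhile (fun x => decide (x ≠ ' ')) r with hw_def
      have hwr : w ++ List.dropWhile (fun x => decide (x ≠ ' ')) r = r :=
        List.takeWhile_append_dropWhile
      set r3 := List.dropWhile (fun x => decide (x ≠ ' ')) r with hr3_def
      have hwl : w.length ≤ r.length := by
        rw [hw_def]; exact (List.takeWhile_prefix _).length_le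
      have hrl : r.length = t.length - (i + s.length) := by
        have := congrArg List.length hdropi'
        simpa using this.symm
      have hdropj : t.drop (i + s.length + w.length) = r3 := by
        rw [← List.drop_drop, hdropi', ← hwr, List.drop_left]
      have hspaces : ∀ x ∈ s, x = ' ' := by
        intro x hx
        have := List.mem_takeWhile_imp hx
        simpa using this
      have hRHS : t.take i ++ pvProc (t.drop i) = t.take i ++ s ++ pvProc r := by
        rw [← hsr, pvProc_spaces s r hspaces, List.append_assoc]
      rcases hq : r with _ | ⟨c, r2⟩
      · -- only spaces remain
        have hi'n : i + s.length = t.length := by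
          rw [hq] at hrl; simp at hrl; omega
        have hw0 : w = [] := by rw [hw_def, hq]; simp
        rw [hw0]
        simp only [List.length_nil, Nat.add_zero, Nat.sub_self]
        have hlr0 : pvLowerRange t (i + s.length) (i + s.length) = t := by
          simp [pvLowerRange]
        rw [if_pos (by omega : (0:Nat) ≤ 2), hlr0]
        rw [ih t (i + s.length) (by omega) (by omega)]
        rw [hdropi', hq, htakei']
        rw [hRHS, hq]
      · -- a word starts at i + s.length
        have hc : ¬ (c = ' ') := by
          have := pvDropWhile_head (fun x => decide (x = ' ')) (t.drop i) c r2 (by rw [← hr_def, hq])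
          simpa using this
        have hw2 : w = c :: r2.takeWhile (fun x => decide (x ≠ ' ')) := by
          rw [hw_def, hq, List.takeWhile_cons, if_pos (by simpa using hc)]
        have hr3v : r3 = r2.dropWhile (fun x => decide (x ≠ ' ')) := by
          rw [hr3_def, hq, List.dropWhile_cons, if_pos (by simpa using hc)]
        have hwpos : 1 ≤ w.length := by rw [hw2]; simp
        have hi'lt : i + s.length < t.length := by
          rw [hq] at hrl; simp at hrl; omega
        have hjn : i + s.length + w.length ≤ t.length := by
          rw [hq] at hrl hwl; simp at hrl hwl; omega
        have hdropc : t.drop (i + s.length) = c :: r2 := by rw [hdropi', hq]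
        have hget : t.getD (i + s.length) ' ' = c := by
          rw [List.getD_eq_getElem?_getD, List.getElem?_eq_getElem hi'lt]
          have h2 := List.drop_eq_getElem_cons hi'lt
          rw [hdropc] at h2
          injection h2 with h3 _
          exact h3.symm
        have hrtake : r.take w.length = w := by
          rw [hw_def]; exact pvTake_takeWhile _ r
        have ht' : (if i + s.length + w.length - (i + s.length) ≤ 2 then
              pvLowerRange t (i + s.length) (i + s.length + w.length)
            else pvLowerRange (t.set (i + s.length) (pvUpperC (t.getD (i + s.length) ' '))) (i + s.length + 1) (i + s.length + w.length))
            = t.take (i + s.length) ++ pvCap w ++ t.drop (i + s.length + w.length) := by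
          rw [show i + s.length + w.length - (i + s.length) = w.length from by omega]
          by_cases hle : w.length ≤ 2
          · rw [if_pos hle]
            simp only [pvLowerRange]
            rw [show i + s.length + w.length - (i + s.length) = w.length from by omega]
            rw [pvLowerRange_eq w.length t (i + s.length) (by omega)]
            rw [hdropi', hrtake]
            rw [show pvCap w = w.map pvLowerC from by unfold pvCap; rw [if_neg (by omega)]]
          · rw [if_neg hle]
            rw [hget]
            simp only [pvLowerRange]
            rw [show i + s.length + w.length - (i + s.length + 1) = w.length - 1 from by omega]
            rw [pvLowerRange_eq (w.length - 1) _ (i + s.length + 1) (by rw [List.length_set]; omega)]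
            have hds1 : (t.set (i + s.length) (pvUpperC c)).drop (i + s.length + 1)
                = t.drop (i + s.length + 1) := by
              rw [List.drop_set, if_pos (by omega)]
            have hdrop1 : t.drop (i + s.length + 1) = r2 := by
              have h2 := congrArg (List.drop 1) hdropc
              rw [List.drop_drop] at h2
              simpa using h2
            have hds2 : (t.set (i + s.length) (pvUpperC c)).drop (i + s.length + 1 + (w.length - 1))
                = t.drop (i + s.length + 1 + (w.length - 1)) := by
              rw [List.drop_set, if_pos (by omega)]
            have htake1 : (t.set (i + s.length) (pvUpperC c)).take (i + s.length + 1)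
                = t.take (i + s.length) ++ [pvUpperC c] := by
              rw [List.take_set, List.set_eq_take_append_cons_drop, if_pos (by simp; omega)]
              rw [List.take_take, List.drop_take]
              simp
            rw [hds1, hdrop1, hds2, htake1]
            rw [show i + s.length + 1 + (w.length - 1) = i + s.length + w.length from by omega]
            rw [show r2.take (w.length - 1) = r2.takeWhile (fun x => decide (x ≠ ' ')) from by
              rw [show w.length - 1 = (r2.takeWhile (fun x => decide (x ≠ ' '))).length from by
                rw [hw2]; simp]
              exact pvTake_takeWhile _ r2]
            have h23 : 2 < (c :: r2.takeWhile (fun x => decide (x ≠ ' '))).length := by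
              rw [← hw2]; omega
            rw [show pvCap w = pvUpperC c :: (r2.takeWhile (fun x => decide (x ≠ ' '))).map pvLowerC from by
              rw [hw2]; unfold pvCap; rw [if_pos h23]]
            simp [List.append_assoc]
        rw [ht']
        have hpre : (t.take (i + s.length) ++ pvCap w).length = i + s.length + w.length := by
          simp [pvCap_length]
          omega
        have hlen' : (t.take (i + s.length) ++ pvCap w ++ t.drop (i + s.length + w.length)).length = t.length := by
          simp [pvCap_length]
          omega
        rw [show pvALoop (t.take (i + s.length) ++ pvCap w ++ t.drop (i + s.length + w.length)) t.length
              (i + s.length + w.length) (i + s.length + w.length) f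
            = pvALoop (t.take (i + s.length) ++ pvCap w ++ t.drop (i + s.length + w.length))
              (t.take (i + s.length) ++ pvCap w ++ t.drop (i + s.length + w.length)).length
              (i + s.length + w.length) (i + s.length + w.length) f by rw [hlen']]
        rw [ih _ (i + s.length + w.length) (by rw [hlen']; omega) (by rw [hlen']; omega)]
        rw [List.take_left' hpre, List.drop_left' hpre, hdropj]
        have hproc : pvProc (c :: r2) = pvCap w ++ pvProc r3 := by
          have hsplit2 : r2.takeWhile (fun x => decide (x ≠ ' ')) ++ r2.dropWhile (fun x => decide (x ≠ ' ')) = r2 :=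
            List.takeWhile_append_dropWhile
          have hmem : ∀ x ∈ r2.takeWhile (fun x => decide (x ≠ ' ')), x ≠ ' ' := fun x hx => by
            simpa using List.mem_takeWhile_imp hx
          have hshape : r2.dropWhile (fun x => decide (x ≠ ' ')) = [] ∨
              ∃ r', r2.dropWhile (fun x => decide (x ≠ ' ')) = ' ' :: r' := by
            rcases hdq : r2.dropWhile (fun x => decide (x ≠ ' ')) with _ | ⟨d, rr⟩
            · exact Or.inl rfl
            · refine Or.inr ⟨rr, ?_⟩
              have hd := pvDropWhile_head _ r2 d rr hdq
              simp at hd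
              rw [hd]
          have hword := pvProc_word c (r2.takeWhile (fun x => decide (x ≠ ' ')))
            (r2.dropWhile (fun x => decide (x ≠ ' '))) hc hmem hshape
          rw [hsplit2] at hword
          rw [hword, hw2, hr3v]
        rw [hRHS, hq, hproc, htakei']
        simp [List.append_assoc]
    · simp only [pvALoop, if_neg (by omega : ¬ (i < t.length ∧ i < t.length))]
      rw [List.drop_eq_nil_of_le (by omega), List.take_of_length_le (by omega)]
      simp [pvProc]

-- B-side: pvSplit is str.split(' ')
def pvSplit : List Char → List (List Char)
  | [] => [[]]
  | c :: r =>
    if c = ' ' then [] :: pvSplit r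
    else match pvSplit r with
      | [] => [[c]]
      | w :: ws => (c :: w) :: ws

def pvConsHead (x : List Char) : List (List Char) → List (List Char)
  | [] => [x]
  | w :: ws => (x ++ w) :: ws

theorem pvSplit_ne_nil (l : List Char) : pvSplit l ≠ [] := by
  cases l with
  | nil => simp [pvSplit]
  | cons c r =>
    simp only [pvSplit]
    split
    · simp
    · split <;> simp

theorem pvSplitOn_go_eq : ∀ (l : List Char) (fuel : Nat) (cur : List Char) (acc : List (List Char)),
    l.length ≤ fuel →
    PySem.Chars.splitOn.go [' '] fuel l cur acc = acc.reverse ++ pvConsHead cur.reverse (pvSplit l) := by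
  intro l
  induction l with
  | nil =>
    intro fuel cur acc _
    cases fuel <;> simp [PySem.Chars.splitOn.go, pvSplit, pvConsHead]
  | cons c rest ih =>
    intro fuel cur acc hf
    cases fuel with
    | zero => simp at hf
    | succ f =>
      simp only [PySem.Chars.splitOn.go]
      by_cases hc : c = ' '
      · subst hc
        rw [if_pos (by simp [List.isPrefixOf])]
        rw [show List.drop [' '].length (' ' :: rest) = rest from rfl]
        rw [ih f [] (cur.reverse :: acc) (by simpa using hf)]
        simp only [pvSplit, reduceIte]
        rcases hq : pvSplit rest with _ | ⟨w, ws⟩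
        · exact absurd hq (pvSplit_ne_nil rest)
        · simp [pvConsHead]
      · rw [if_neg (by simp [List.isPrefixOf]; exact fun h => hc h.symm)]
        rw [ih f (c :: cur) acc (by simpa using hf)]
        simp only [pvSplit, if_neg hc]
        rcases hq : pvSplit rest with _ | ⟨w, ws⟩
        · exact absurd hq (pvSplit_ne_nil rest)
        · simp [pvConsHead]

theorem pvSplitOn_eq (l : List Char) : PySem.Chars.splitOn l [' '] = pvSplit l := by
  rw [PySem.Chars.splitOn, pvSplitOn_go_eq l (l.length+1) [] [] (by omega)]
  rcases hq : pvSplit l with _ | ⟨w, ws⟩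
  · exact absurd hq (pvSplit_ne_nil l)
  · simp [pvConsHead]

theorem pvSplit_shape (l : List Char) :
    pvSplit l = (l.takeWhile (fun x => decide (x ≠ ' '))) ::
      (match l.dropWhile (fun x => decide (x ≠ ' ')) with
       | [] => ([] : List (List Char))
       | _ :: r' => pvSplit r') := by
  induction l with
  | nil => simp [pvSplit]
  | cons c r ih =>
    by_cases hc : c = ' '
    · subst hc
      simp [pvSplit]
    · simp only [pvSplit, if_neg hc, List.takeWhile_cons, List.dropWhile_cons,
        decide_not, show (decide (c = ' ')) = false by simpa using hc]
      rw [ih]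
      simp

theorem pvJoin_cap_split_aux : ∀ (n : Nat) (l : List Char), l.length ≤ n →
    PySem.Chars.join [' '] ((pvSplit l).map pvCap) = pvProc l := by
  intro n
  induction n with
  | zero =>
    intro l h
    have hl : l = [] := List.eq_nil_of_length_eq_zero (by omega)
    subst hl
    simp [pvSplit, pvProc, pvCap, PySem.Chars.join_singleton]
  | succ n ih =>
    intro l hl
    cases l with
    | nil => simp [pvSplit, pvProc, pvCap, PySem.Chars.join_singleton]
    | cons c r =>
      by_cases hc : c = ' '
      · subst hc
        simp only [pvSplit, reduceIte, List.map_cons]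
        rcases hq : pvSplit r with _ | ⟨w, ws⟩
        · exact absurd hq (pvSplit_ne_nil r)
        · rw [show pvCap [] = [] from rfl, List.map_cons, PySem.Chars.join_cons_cons]
          rw [← List.map_cons, ← hq, ih r (by simpa using hl)]
          simp [pvProc]
      · rw [pvSplit_shape]
        have hdc : (c :: r).dropWhile (fun x => decide (x ≠ ' ')) = r.dropWhile (fun x => decide (x ≠ ' ')) := by
          simp [hc]
        have htc : (c :: r).takeWhile (fun x => decide (x ≠ ' ')) = c :: r.takeWhile (fun x => decide (x ≠ ' ')) := by
          simp [hc]
        rw [hdc, htc]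
        rcases hq : r.dropWhile (fun x => decide (x ≠ ' ')) with _ | ⟨d, r'⟩
        · simp only [List.map_cons, List.map_nil, PySem.Chars.join_singleton]
          simp only [pvProc, if_neg hc, hq]
          simp
        · have hd : d = ' ' := by
            have := pvDropWhile_head _ r d r' hq
            simpa using this
          subst hd
          have hm : (match (' ' :: r' : List Char) with | [] => ([] : List (List Char)) | _ :: x => pvSplit x) = pvSplit r' := rfl
          rw [hm]
          rcases hq2 : pvSplit r' with _ | ⟨w, ws⟩
          · exact absurd hq2 (pvSplit_ne_nil r')
          · rw [List.map_cons, List.map_cons, PySem.Chars.join_cons_cons]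
            rw [← List.map_cons, ← hq2]
            have hr' : r'.length ≤ n := by
              have h1 := List.length_dropWhile_le (fun x => decide (x ≠ ' ')) r
              rw [hq] at h1
              simp at h1 hl
              omega
            rw [ih r' hr']
            simp only [pvProc, if_neg hc, hq]
            simp

theorem pvJoin_cap_split (l : List Char) :
    PySem.Chars.join [' '] ((pvSplit l).map pvCap) = pvProc l :=
  pvJoin_cap_split_aux l.length l le_rfl

-- ===== VERDICT (by name: the statement is the Claim_ definition above) =====
theorem capitalizeTitle2_spec : Claim_equal_capitalizeTitle2 := by
  intro title _
  unfold Spec_capitalizeTitle2 capitalizeTitle2 capitalizeTitle2_alt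
  rw [pvALoop_eq (title.toList.length + 1) title.toList 0 (by simp) (by omega)]
  rw [pvSplitOn_eq, pvJoin_cap_split]
  simp
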